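-- pv_equiv track=rewrite | github.com/JonathanJihwanKim/pbip_model_lenz | src/model_lenz/parsers/m_query.py | _split_let_in
-- ===== SOURCE A (Python) =====
-- def _split_let_in(src: str) -> tuple[str, str | None]:
--     """Return (let_body, in_step) given an M expression beginning with ``let``."""
--     src = src.strip()
--     if not src.lower().startswith("let"):
--         return ("", None)
--     body_start = 3  # after 'let'
--     # Find the matching `in` keyword at top level (depth == 0).
--     depth_paren = 0
--     depth_brack = 0
--     depth_brace = 0
--     in_str = False
--     i = body_start
--     n = len(src)
--     while i < n:
--         c = src[i]
--         if c == '"':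
--             if in_str and i + 1 < n and src[i + 1] == '"':
--                 i += 2
--                 continue
--             in_str = not in_str
--             i += 1
--             continue
--         if in_str:
--             i += 1
--             continue
--         if c == "(":
--             depth_paren += 1
--         elif c == ")":
--             depth_paren -= 1
--         elif c == "[":
--             depth_brack += 1
--         elif c == "]":
--             depth_brack -= 1
--         elif c == "{":
--             depth_brace += 1
--         elif c == "}":
--             depth_brace -= 1
--         elif (
--             depth_paren == 0
--             and depth_brack == 0
--             and depth_brace == 0
--             and src[i : i + 2].lower() == "in"
--             and (i == 0 or not (src[i - 1].isalnum() or src[i - 1] == "_"))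
--             and (i + 2 == n or not (src[i + 2].isalnum() or src[i + 2] == "_"))
--         ):
--             let_body = src[body_start:i]
--             in_step = src[i + 2 :].strip()
--             # Strip trailing punctuation/braces on `in_step`
--             return (let_body, in_step or None)
--         i += 1
--     return (src[body_start:], None)
-- ===== SOURCE B (Python) =====
-- def _split_let_in(src: str) -> tuple[str, str | None]:
--     """Return (let_body, in_step) given an M expression beginning with ``let``.
--
--     Two staged passes instead of one scanner: first tokenize src[3:] into a
--     list of (kind, start, end) tokens (string literals honoring the "" escape,
--     bracket characters, identifier words); then walk the token list with three
--     depth counters and split at the first top-level standalone word `in`.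
--     """
--     src = src.strip()
--     if not src.lower().startswith("let"):
--         return ("", None)
--     n = len(src)
--
--     # Pass 1: tokenize. Whitespace/punctuation between tokens carries no
--     # information for the split, so it produces no token.
--     tokens: list[tuple[str, int, int]] = []
--     i = 3
--     while i < n:
--         c = src[i]
--         if c == '"':
--             j = i + 1
--             while j < n:
--                 if src[j] == '"':
--                     if j + 1 < n and src[j + 1] == '"':
--                         j += 2
--                     else:
--                         j += 1
--                         break
--                 else:
--                     j += 1
--             tokens.append(("str", i, j))  # j == n if the literal never closes
--             i = j
--         elif c in "()[]{}":
--             tokens.append((c, i, i + 1))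
--             i += 1
--         elif c.isalnum() or c == "_":
--             j = i + 1
--             while j < n and (src[j].isalnum() or src[j] == "_"):
--                 j += 1
--             tokens.append(("word", i, j))
--             i = j
--         else:
--             i += 1
--
--     # Pass 2: find the first word token `in` while all bracket depths are 0.
--     dp = db = dc = 0
--     for kind, s, e in tokens:
--         if kind == "(":
--             dp += 1
--         elif kind == ")":
--             dp -= 1
--         elif kind == "[":
--             db += 1
--         elif kind == "]":
--             db -= 1
--         elif kind == "{":
--             dc += 1
--         elif kind == "}":
--             dc -= 1
--         elif (
--             kind == "word"
--             and dp == 0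
--             and db == 0
--             and dc == 0
--             and src[s:e].lower() == "in"
--             and not (src[s - 1].isalnum() or src[s - 1] == "_")
--         ):
--             in_step = src[e:].strip()
--             return (src[3:s], in_step or None)
--     return (src[3:], None)
-- ===== Notes on version B (the rewrite author's own statement) =====
-- stated objective: alternative
-- what changed: B replaces A's single character-by-character scanner (with an in_str flag and per-character keyword slicing) by two staged passes: a tokenizer that turns src[3:] into a list of (kind,start,end) tokens (string literals with the "" escape, bracket characters, identifier words), then a walk over the token list with three depth counters that splits at the first top-level word token 'in'.
import Mathlib
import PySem

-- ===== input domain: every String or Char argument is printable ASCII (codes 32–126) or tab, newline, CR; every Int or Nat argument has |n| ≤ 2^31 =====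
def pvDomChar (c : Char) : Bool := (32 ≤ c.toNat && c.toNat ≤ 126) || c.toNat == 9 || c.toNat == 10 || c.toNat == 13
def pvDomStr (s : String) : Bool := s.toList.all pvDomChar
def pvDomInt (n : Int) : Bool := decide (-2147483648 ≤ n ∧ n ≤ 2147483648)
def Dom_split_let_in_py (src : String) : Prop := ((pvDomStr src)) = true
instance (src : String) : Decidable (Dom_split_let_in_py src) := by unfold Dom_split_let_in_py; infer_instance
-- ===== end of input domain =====

-- B is a two-pass re-decomposition (tokenize src[3:] into string/bracket/word tokens, then
-- scan the token list with three depth counters); same O(n) cost (objective: alternative).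

-- shared char-level helper: port of Python's `ch.isalnum() or ch == "_"` (exact on ASCII)
def pvAlnumU (c : Char) : Bool := PySem.Chars.isalnum c || c == '_'
-- port of `i + 2 == n or not (src[i+2].isalnum() or src[i+2] == "_")` read off the tail:
-- r = src[i+1:], so src[i+2] is r's second char (absent ⇔ i+2 ≥ n)
def pvNextOk (r : List Char) : Bool :=
  match r.tail.head? with
  | none => true
  | some d => !pvAlnumU d

-- ===== PORT A =====
-- A's while-loop; rest = src[i:] carried along; src[i-1] is read directly as cs[i-1]?
-- (i ≥ 3 > 0 here, so the index is in range whenever Python reads it; the ' ' default is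
-- never read because Python short-circuits on i == 0). Slices: src[3:] = cs.drop 3,
-- src[3:i] = (cs.drop 3).take (i-3), src[i+2:] = r.drop 1 (indices in range, nonnegative).
def loopA (cs : List Char) : List Char → Nat → Int → Int → Int → Bool →
    String × Option String
  | [], _, _, _, _, _ => (String.ofList (cs.drop 3), none)
  | c :: r, i, dp, db, dc, instr =>
    if c = '"' then
      -- `if in_str and i + 1 < n and src[i+1] == '"'`: src[i+1] read off r's head
      if instr && (r.head? == some '"') then loopA cs r.tail (i + 2) dp db dc instr
      else loopA cs r (i + 1) dp db dc (!instr)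
    else if instr then loopA cs r (i + 1) dp db dc instr
    else if c = '(' then loopA cs r (i + 1) (dp + 1) db dc instr
    else if c = ')' then loopA cs r (i + 1) (dp - 1) db dc instr
    else if c = '[' then loopA cs r (i + 1) dp (db + 1) dc instr
    else if c = ']' then loopA cs r (i + 1) dp (db - 1) dc instr
    else if c = '{' then loopA cs r (i + 1) dp db (dc + 1) instr
    else if c = '}' then loopA cs r (i + 1) dp db (dc - 1) instr
    else if dp = 0 ∧ db = 0 ∧ dc = 0 ∧
        PySem.Chars.lower (List.take 2 (c :: r)) = ['i', 'n'] ∧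
        (i = 0 ∨ pvAlnumU ((cs[i-1]?).getD ' ') = false) ∧ pvNextOk r = true then
      let t := PySem.Chars.strip (r.drop 1)
      (String.ofList ((cs.drop 3).take (i - 3)),
        if t.isEmpty then none else some (String.ofList t))
    else loopA cs r (i + 1) dp db dc instr
  termination_by rest _ _ _ _ _ => rest.length
  decreasing_by all_goals simp_all

def split_let_in_py (src : String) : String × Option String :=
  let cs := PySem.Chars.strip src.toList
  if !PySem.Chars.startswith (PySem.Chars.lower cs) ['l', 'e', 't'] then ("", none)
  else loopA cs (cs.drop 3) 3 0 0 0 false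

-- ===== PORT B =====
-- B's inner `while j < n` loop for a string literal: called on src[j:] just after the
-- opening quote; returns (src[j':], j') for j' just past the closing quote, or the
-- exhausted ([], n) if the literal never closes.
def skipString : List Char → Nat → List Char × Nat
  | [], k => ([], k)
  | '"' :: '"' :: r, k => skipString r (k + 2)
  | '"' :: r, k => (r, k + 1)
  | _ :: r, k => skipString r (k + 1)

-- B's inner word loop: consume `while src[j].isalnum() or src[j] == '_'`
def skipWord : List Char → Nat → List Char × Nat
  | [], k => ([], k)
  | c :: r, k => if pvAlnumU c then skipWord r (k + 1) else (c :: r, k)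

-- (used only for tokenize's termination; cited by name in decreasing_by)
theorem skipString_drop (r : List Char) (k : Nat) :
    ∃ m, skipString r k = (r.drop m, k + m) := by
  induction r, k using skipString.induct with
  | case1 k => exact ⟨0, rfl⟩
  | case2 r k ih =>
    obtain ⟨m, hm⟩ := ih
    exact ⟨m + 2, by rw [skipString, hm, Prod.mk.injEq]; exact ⟨by simp, by omega⟩⟩
  | case3 r k hne =>
    refine ⟨1, ?_⟩
    rw [skipString]
    · simp
    · exact hne
  | case4 c r k hne1 hne2 ih =>
    obtain ⟨m, hm⟩ := ih
    refine ⟨m + 1, ?_⟩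
    rw [skipString]
    · rw [hm, Prod.mk.injEq]; exact ⟨by simp, by omega⟩
    · exact hne1
    · exact hne2

theorem skipString_len (r : List Char) (k : Nat) :
    (skipString r k).1.length ≤ r.length := by
  obtain ⟨m, hm⟩ := skipString_drop r k
  rw [hm]; simp

theorem skipWord_eq (r : List Char) (k : Nat) :
    skipWord r k = (r.dropWhile pvAlnumU, k + (r.takeWhile pvAlnumU).length) := by
  induction r generalizing k with
  | nil => simp [skipWord]
  | cons c r ih =>
    rw [skipWord]
    by_cases h : pvAlnumU c
    · rw [if_pos h, ih, List.dropWhile_cons_of_pos h, List.takeWhile_cons_of_pos h]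
      rw [Prod.mk.injEq]; exact ⟨rfl, by simp; omega⟩
    · rw [if_neg h, List.dropWhile_cons_of_neg h, List.takeWhile_cons_of_neg h]
      simp

theorem skipWord_len (r : List Char) (k : Nat) :
    (skipWord r k).1.length ≤ r.length := by
  rw [skipWord_eq]
  simpa using List.length_dropWhile_le ..

-- Pass 1: tokenize src[3:] into ("str" | single bracket | "word", start, end) tokens;
-- whitespace/punctuation carries no token.
def tokenize : List Char → Nat → List (String × Nat × Nat)
  | [], _ => []
  | c :: r, i =>
    if c = '"' then
      let p := skipString r (i + 1)
      ("str", i, p.2) :: tokenize p.1 p.2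
    else if c = '(' ∨ c = ')' ∨ c = '[' ∨ c = ']' ∨ c = '{' ∨ c = '}' then
      (String.ofList [c], i, i + 1) :: tokenize r (i + 1)
    else if pvAlnumU c then
      let p := skipWord r (i + 1)
      ("word", i, p.2) :: tokenize p.1 p.2
    else tokenize r (i + 1)
  termination_by r _ => r.length
  decreasing_by
  · exact Nat.lt_succ_of_le (skipString_len ..)
  · simp
  · exact Nat.lt_succ_of_le (skipWord_len ..)
  · simp

-- Pass 2: walk the token list with the three depth counters.
def scanToks (cs : List Char) : List (String × Nat × Nat) → Int → Int → Int →
    String × Option String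
  | [], _, _, _ => (String.ofList (cs.drop 3), none)
  | (k, s, e) :: ts, dp, db, dc =>
    if k = "(" then scanToks cs ts (dp + 1) db dc
    else if k = ")" then scanToks cs ts (dp - 1) db dc
    else if k = "[" then scanToks cs ts dp (db + 1) dc
    else if k = "]" then scanToks cs ts dp (db - 1) dc
    else if k = "{" then scanToks cs ts dp db (dc + 1)
    else if k = "}" then scanToks cs ts dp db (dc - 1)
    else if k = "word" ∧ dp = 0 ∧ db = 0 ∧ dc = 0 ∧
        PySem.Chars.lower ((cs.drop s).take (e - s)) = ['i', 'n'] ∧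
        pvAlnumU ((cs[s-1]?).getD ' ') = false then
      let t := PySem.Chars.strip (cs.drop e)
      (String.ofList ((cs.drop 3).take (s - 3)),
        if t.isEmpty then none else some (String.ofList t))
    else scanToks cs ts dp db dc

def split_let_in_py_alt (src : String) : String × Option String :=
  let cs := PySem.Chars.strip src.toList
  if !PySem.Chars.startswith (PySem.Chars.lower cs) ['l', 'e', 't'] then ("", none)
  else scanToks cs (tokenize (cs.drop 3) 3) 0 0 0

-- ===== PRECONDITION & SPEC =====
def Spec_split_let_in_py (src : String) (out : String × Option String) : Prop := out = split_let_in_py_alt src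
instance (src : String) (out : String × Option String) : Decidable (Spec_split_let_in_py src out) := by unfold Spec_split_let_in_py; infer_instance

-- ===== CLAIM (what is proved, stated in full; the proofs are below) =====
def Claim_equal_split_let_in_py : Prop := ∀ (src : String), Dom_split_let_in_py src → Spec_split_let_in_py src (split_let_in_py src)

-- ===== LEMMAS AND PROOFS =====

-- basic char facts
theorem char_eq_of_toNat {c : Char} {m : Nat} (d : Char) (hd : d.toNat = m) (h : c.toNat = m) :
    c = d := by
  apply Char.ext; apply UInt32.toNat_inj.mp; show c.toNat = d.toNat; omega

theorem isupper_iff (c : Char) : PySem.Chars.isupper c = true ↔ 65 ≤ c.toNat ∧ c.toNat ≤ 90 := by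
  unfold PySem.Chars.isupper
  rw [Bool.and_eq_true, decide_eq_true_iff, decide_eq_true_iff,
    Char.le_def, Char.le_def, UInt32.le_iff_toNat_le, UInt32.le_iff_toNat_le]
  exact Iff.rfl

theorem lowerChar_eq_iff (c l u : Char) (hlu : u.toNat + 32 = l.toNat)
    (hl : 97 ≤ l.toNat) (hl2 : l.toNat ≤ 122) :
    PySem.Chars.lowerChar c = l ↔ c = l ∨ c = u := by
  unfold PySem.Chars.lowerChar
  by_cases hu : PySem.Chars.isupper c = true
  · rw [if_pos hu]
    have hb := (isupper_iff c).mp hu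
    have hv : (c.toNat + 32).isValidChar := Or.inl (by omega)
    have ht : (Char.ofNat (c.toNat + 32)).toNat = c.toNat + 32 := by
      rw [Char.toNat_ofNat, if_pos hv]
    constructor
    · intro h
      have := congrArg Char.toNat h
      rw [ht] at this
      exact Or.inr (char_eq_of_toNat (m := u.toNat) u rfl (by omega))
    · rintro (rfl | rfl)
      · exfalso; omega
      · exact char_eq_of_toNat (m := l.toNat) l rfl (by omega)
  · rw [if_neg hu]
    have hb : ¬(65 ≤ c.toNat ∧ c.toNat ≤ 90) := fun h => hu ((isupper_iff c).mpr h)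
    constructor
    · exact Or.inl
    · rintro (rfl | rfl)
      · rfl
      · exact absurd ⟨by omega, by omega⟩ hb

-- word characters are none of the scanner's special characters
theorem alnum_not_special (c : Char) (h : pvAlnumU c = true) :
    c ≠ '"' ∧ c ≠ '(' ∧ c ≠ ')' ∧ c ≠ '[' ∧ c ≠ ']' ∧ c ≠ '{' ∧ c ≠ '}' := by
  refine ⟨?_, ?_, ?_, ?_, ?_, ?_, ?_⟩ <;> (rintro rfl; exact absurd h (by decide))

theorem lowerChar_i_alnum (c : Char) (h : PySem.Chars.lowerChar c = 'i') :
    pvAlnumU c = true := by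
  rcases (lowerChar_eq_iff c 'i' 'I' (by decide) (by decide) (by decide)).mp h with rfl | rfl <;>
    decide

theorem lowerChar_n_alnum (c : Char) (h : PySem.Chars.lowerChar c = 'n') :
    pvAlnumU c = true := by
  rcases (lowerChar_eq_iff c 'n' 'N' (by decide) (by decide) (by decide)).mp h with rfl | rfl <;>
    decide

-- drop/index bridges
theorem drop_succ_of_drop {α : Type} (cs t : List α) (x : α) (i : Nat)
    (h : cs.drop i = x :: t) : cs.drop (i + 1) = t := by
  have h2 := congrArg (List.drop 1) h
  rw [List.drop_drop] at h2
  simpa using h2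

theorem getElem?_of_drop {α : Type} (cs t : List α) (x : α) (i : Nat)
    (h : cs.drop i = x :: t) : cs[i]? = some x := by
  have h2 : (cs.drop i).head? = some x := by rw [h]; rfl
  rwa [List.head?_drop] at h2

-- A in the in_str = true state consumes exactly B's skip_string
theorem loopA_instr (cs : List Char) (rest : List Char) (i : Nat) :
    ∀ (dp db dc : Int),
      loopA cs rest i dp db dc true =
        loopA cs (skipString rest i).1 (skipString rest i).2 dp db dc false := by
  induction rest, i using skipString.induct with
  | case1 k => intro dp db dc; simp [loopA, skipString]
  | case2 r k ih =>
    intro dp db dc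
    rw [loopA, skipString]
    simp only [List.head?_cons, List.tail_cons, beq_self_eq_true, Bool.and_self, if_true]
    exact ih dp db dc
  | case3 r k hne =>
    intro dp db dc
    rw [loopA, skipString]
    · have hh : ¬(r.head? == some '"') = true := by
        cases r with
        | nil => simp
        | cons d r2 =>
          simp only [List.head?_cons, beq_iff_eq, Option.some.injEq]
          exact fun h => hne r2 (by rw [h])
      simp only [Bool.not_eq_true] at hh
      simp [hh]
    · exact hne
  | case4 c r k hne1 hne2 ih =>
    intro dp db dc
    rw [loopA, skipString]
    · rw [if_neg (fun h => hne2 h), if_pos rfl]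
      exact ih dp db dc
    · exact hne1
    · exact hne2

-- A skips the remaining characters of a word whose previous character is a word character
theorem loopA_skipword (cs : List Char) :
    ∀ (ws tl : List Char) (i : Nat) (dp db dc : Int),
      ws ++ tl = cs.drop i → (∀ x ∈ ws, pvAlnumU x = true) → 1 ≤ i →
      pvAlnumU ((cs[i-1]?).getD ' ') = true →
      loopA cs (ws ++ tl) i dp db dc false = loopA cs tl (i + ws.length) dp db dc false := by
  intro ws
  induction ws with
  | nil => intro tl i dp db dc _ _ _ _; simp
  | cons x ws ih =>
    intro tl i dp db dc hdrop hall hi hprev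
    have hx : pvAlnumU x = true := hall x (by simp)
    obtain ⟨hq, h1, h2, h3, h4, h5, h6⟩ := alnum_not_special x hx
    have hstep : loopA cs (x :: (ws ++ tl)) i dp db dc false =
        loopA cs (ws ++ tl) (i + 1) dp db dc false := by
      rw [loopA]
      rw [if_neg hq]
      simp only [Bool.false_eq_true, if_false]
      rw [if_neg h1, if_neg h2, if_neg h3, if_neg h4, if_neg h5, if_neg h6, if_neg]
      rintro ⟨-, -, -, -, h0 | hpv, -⟩
      · omega
      · rw [hprev] at hpv; exact absurd hpv (by simp)
    rw [List.cons_append] at *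
    rw [hstep]
    have hdrop' : ws ++ tl = cs.drop (i + 1) :=
      (drop_succ_of_drop cs (ws ++ tl) x i hdrop.symm).symm
    have hci : cs[i]? = some x := getElem?_of_drop cs (ws ++ tl) x i hdrop.symm
    have hrec := ih tl (i + 1) dp db dc hdrop' (fun y hy => hall y (by simp [hy]))
      (by omega) (by simpa [hci] using hx)
    rw [hrec]
    have : i + 1 + ws.length = i + (x :: ws).length := by simp; omega
    rw [this]

-- at the first character of a maximal word, A's keyword test (2-char slice + right
-- boundary) says exactly "the whole word, lowercased, is `in`"
theorem word_cond_iff (c : Char) (r : List Char) :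
    (PySem.Chars.lower (List.take 2 (c :: r)) = ['i', 'n'] ∧ pvNextOk r = true)
      ↔ PySem.Chars.lower (c :: r.takeWhile pvAlnumU) = ['i', 'n'] := by
  cases r with
  | nil =>
    simp [pvNextOk, PySem.Chars.lower]
  | cons d r2 =>
    by_cases hd : pvAlnumU d = true
    · rw [List.takeWhile_cons_of_pos hd,
        show List.take 2 (c :: d :: r2) = [c, d] from rfl]
      simp only [PySem.Chars.lower, List.map_cons, List.cons.injEq, pvNextOk, List.tail_cons]
      cases r2 with
      | nil => simp
      | cons x r3 =>
        by_cases hx : pvAlnumU x = true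
        · rw [List.takeWhile_cons_of_pos hx]
          simp [hx]
        · have hx' : pvAlnumU x = false := by simpa using hx
          rw [List.takeWhile_cons_of_neg (p := pvAlnumU) (by simp [hx'])]
          simp [hx']
    · rw [List.takeWhile_cons_of_neg (by simp [hd])]
      constructor
      · rintro ⟨hlow, -⟩
        exfalso
        rw [show List.take 2 (c :: d :: r2) = [c, d] from rfl] at hlow
        simp only [PySem.Chars.lower, List.map_cons, List.map_nil, List.cons.injEq,
          and_true] at hlow
        exact absurd (lowerChar_n_alnum d hlow.2) (by simp [hd])
      · intro h
        exfalso
        simp [PySem.Chars.lower] at h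

theorem main_loop (cs : List Char) :
    ∀ (N : Nat) (rest : List Char), rest.length ≤ N →
      ∀ (i : Nat) (dp db dc : Int), rest = cs.drop i → 3 ≤ i →
        loopA cs rest i dp db dc false = scanToks cs (tokenize rest i) dp db dc := by
  intro N
  induction N with
  | zero =>
    intro rest hle i dp db dc _ _
    have : rest = [] := List.eq_nil_of_length_eq_zero (Nat.le_zero.mp hle)
    subst this
    simp [loopA, tokenize, scanToks]
  | succ N ih =>
    intro rest hle i dp db dc hrest hi
    cases rest with
    | nil => simp [loopA, tokenize, scanToks]
    | cons c r =>
      have hr : r.length ≤ N := by simpa using hle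
      have hdrop1 : cs.drop (i + 1) = r := drop_succ_of_drop cs r c i hrest.symm
      have hci : cs[i]? = some c := getElem?_of_drop cs r c i hrest.symm
      by_cases hq : c = '"'
      · -- string literal token
        subst hq
        obtain ⟨m, hm⟩ := skipString_drop r (i + 1)
        have hA : loopA cs ('"' :: r) i dp db dc false =
            loopA cs (r.drop m) (i + 1 + m) dp db dc false := by
          rw [loopA]
          simp only [Bool.false_and, Bool.false_eq_true, if_false, if_true,
            Bool.not_false]
          rw [loopA_instr cs r (i + 1) dp db dc, hm]
        have hB : tokenize ('"' :: r) i = ("str", i, i + 1 + m) :: tokenize (r.drop m) (i + 1 + m) := by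
          rw [tokenize]
          simp only [hm, if_true]
        have hsk : scanToks cs (("str", i, i + 1 + m) :: tokenize (r.drop m) (i + 1 + m)) dp db dc
            = scanToks cs (tokenize (r.drop m) (i + 1 + m)) dp db dc := by
          rw [scanToks]
          simp
        rw [hA, hB, hsk]
        exact ih (r.drop m) (by rw [List.length_drop]; omega)
          (i + 1 + m) dp db dc
          (by rw [← hdrop1, List.drop_drop]) (by omega)
      · -- not a string literal
        by_cases hbr : c = '(' ∨ c = ')' ∨ c = '[' ∨ c = ']' ∨ c = '{' ∨ c = '}'
        · -- bracket token
          have hB : tokenize (c :: r) i =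
              (String.ofList [c], i, i + 1) :: tokenize r (i + 1) := by
            rw [tokenize, if_neg hq, if_pos hbr]
          rw [hB]
          have hrec := fun dp' db' dc' => ih r hr (i + 1) dp' db' dc' hdrop1.symm (by omega)
          rcases hbr with rfl | rfl | rfl | rfl | rfl | rfl
          · rw [loopA, scanToks, show String.ofList ['('] = "(" from rfl]
            simp only; norm_num; exact hrec _ _ _
          · rw [loopA, scanToks, show String.ofList [')'] = ")" from rfl]
            simp only; norm_num; exact hrec _ _ _
          · rw [loopA, scanToks, show String.ofList ['['] = "[" from rfl]
            simp only; norm_num; exact hrec _ _ _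
          · rw [loopA, scanToks, show String.ofList [']'] = "]" from rfl]
            simp only; norm_num; exact hrec _ _ _
          · rw [loopA, scanToks, show String.ofList ['{'] = "{" from rfl]
            simp only; norm_num; exact hrec _ _ _
          · rw [loopA, scanToks, show String.ofList ['}'] = "}" from rfl]
            simp only; norm_num; exact hrec _ _ _
        · rw [not_or, not_or, not_or, not_or, not_or] at hbr
          obtain ⟨h1, h2, h3, h4, h5, h6⟩ := hbr
          by_cases hw : pvAlnumU c = true
          · -- word token
            have hskip : skipWord r (i + 1) =
                (r.dropWhile pvAlnumU, i + 1 + (r.takeWhile pvAlnumU).length) :=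
              skipWord_eq r (i + 1)
            have hB : tokenize (c :: r) i =
                ("word", i, i + 1 + (r.takeWhile pvAlnumU).length) ::
                  tokenize (r.dropWhile pvAlnumU) (i + 1 + (r.takeWhile pvAlnumU).length) := by
              rw [tokenize, if_neg hq, if_neg ?_, if_pos hw, hskip]
              rintro (h | h | h | h | h | h) <;> simp_all
            have hsplit : (r.takeWhile pvAlnumU) ++ (r.dropWhile pvAlnumU) = r :=
              List.takeWhile_append_dropWhile
            have htk : r.take (r.takeWhile pvAlnumU).length = r.takeWhile pvAlnumU := by
              have h2 := List.take_left' (l₁ := r.takeWhile pvAlnumU)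
                (l₂ := r.dropWhile pvAlnumU) rfl
              rwa [hsplit] at h2
            have hdr : r.drop (r.takeWhile pvAlnumU).length = r.dropWhile pvAlnumU := by
              have h2 := List.drop_left' (l₁ := r.takeWhile pvAlnumU)
                (l₂ := r.dropWhile pvAlnumU) rfl
              rwa [hsplit] at h2
            have htake : (cs.drop i).take (i + 1 + (r.takeWhile pvAlnumU).length - i) =
                c :: r.takeWhile pvAlnumU := by
              rw [← hrest, show i + 1 + (r.takeWhile pvAlnumU).length - i
                  = (r.takeWhile pvAlnumU).length + 1 by omega]
              rw [List.take_succ_cons, htk]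
            have hdropE : cs.drop (i + 1 + (r.takeWhile pvAlnumU).length) =
                r.dropWhile pvAlnumU := by
              rw [show i + 1 + (r.takeWhile pvAlnumU).length
                  = (i + 1) + (r.takeWhile pvAlnumU).length by omega, ← List.drop_drop, hdrop1,
                hdr]
            have hrec := ih (r.dropWhile pvAlnumU)
              (le_trans (List.length_dropWhile_le ..) hr)
              (i + 1 + (r.takeWhile pvAlnumU).length) dp db dc hdropE.symm (by omega)
            by_cases hcond : dp = 0 ∧ db = 0 ∧ dc = 0 ∧
                PySem.Chars.lower (c :: r.takeWhile pvAlnumU) = ['i', 'n'] ∧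
                pvAlnumU ((cs[i-1]?).getD ' ') = false
            · -- the top-level `in` keyword: both sides return here
              obtain ⟨hdp, hdb, hdcz, hlow, hprev⟩ := hcond
              have hAcond := (word_cond_iff c r).mpr hlow
              have hlen : (r.takeWhile pvAlnumU).length = 1 := by
                have := congrArg List.length hlow
                simp only [PySem.Chars.lower, List.length_map, List.length_cons,
                  List.length_nil] at this
                omega
              have hA : loopA cs (c :: r) i dp db dc false =
                  (String.ofList ((cs.drop 3).take (i - 3)),
                    if (PySem.Chars.strip (r.drop 1)).isEmpty then none
                    else some (String.ofList (PySem.Chars.strip (r.drop 1)))) := by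
                rw [loopA]
                simp only [Bool.false_and, Bool.false_eq_true, if_false]
                rw [if_neg hq, if_neg h1, if_neg h2, if_neg h3, if_neg h4, if_neg h5, if_neg h6,
                  if_pos ⟨hdp, hdb, hdcz, hAcond.1, Or.inr hprev, hAcond.2⟩]
              have hBv : scanToks cs (tokenize (c :: r) i) dp db dc =
                  (String.ofList ((cs.drop 3).take (i - 3)),
                    if (PySem.Chars.strip (cs.drop (i + 1 + (r.takeWhile pvAlnumU).length))).isEmpty
                    then none
                    else some (String.ofList
                      (PySem.Chars.strip (cs.drop (i + 1 + (r.takeWhile pvAlnumU).length))))) := by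
                rw [hB, scanToks,
                  if_neg (by decide : ¬("word":String) = "("),
                  if_neg (by decide : ¬("word":String) = ")"),
                  if_neg (by decide : ¬("word":String) = "["),
                  if_neg (by decide : ¬("word":String) = "]"),
                  if_neg (by decide : ¬("word":String) = "{"),
                  if_neg (by decide : ¬("word":String) = "}"),
                  if_pos ⟨rfl, hdp, hdb, hdcz, by rw [htake]; exact hlow, hprev⟩]
              have htl : r.dropWhile pvAlnumU = r.drop 1 := by
                rw [← hdr, hlen]
              rw [hA, hBv, hdropE, htl]
            · -- no keyword here: A walks over the word, B skips the token
              have hnA : ¬(dp = 0 ∧ db = 0 ∧ dc = 0 ∧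
                  PySem.Chars.lower (List.take 2 (c :: r)) = ['i', 'n'] ∧
                  (i = 0 ∨ pvAlnumU ((cs[i-1]?).getD ' ') = false) ∧ pvNextOk r = true) := by
                rintro ⟨hdp, hdb, hdcz, hlow, hpv, hnx⟩
                rcases hpv with h0 | hpv
                · omega
                · exact hcond ⟨hdp, hdb, hdcz, (word_cond_iff c r).mp ⟨hlow, hnx⟩, hpv⟩
              have hA : loopA cs (c :: r) i dp db dc false =
                  loopA cs r (i + 1) dp db dc false := by
                rw [loopA]
                simp only [Bool.false_and, Bool.false_eq_true, if_false]
                rw [if_neg hq, if_neg h1, if_neg h2, if_neg h3, if_neg h4, if_neg h5, if_neg h6,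
                  if_neg hnA]
              have hskipA : loopA cs r (i + 1) dp db dc false =
                  loopA cs (r.dropWhile pvAlnumU) (i + 1 + (r.takeWhile pvAlnumU).length)
                    dp db dc false := by
                have hsw := loopA_skipword cs (r.takeWhile pvAlnumU) (r.dropWhile pvAlnumU)
                  (i + 1) dp db dc (by rw [hsplit, hdrop1])
                  (fun x hx => List.mem_takeWhile_imp hx) (by omega)
                  (by simpa [hci] using hw)
                rw [hsplit] at hsw
                rw [hsw]
              have hBskip : scanToks cs (tokenize (c :: r) i) dp db dc =
                  scanToks cs (tokenize (r.dropWhile pvAlnumU)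
                    (i + 1 + (r.takeWhile pvAlnumU).length)) dp db dc := by
                rw [hB, scanToks,
                  if_neg (by decide : ¬("word":String) = "("),
                  if_neg (by decide : ¬("word":String) = ")"),
                  if_neg (by decide : ¬("word":String) = "["),
                  if_neg (by decide : ¬("word":String) = "]"),
                  if_neg (by decide : ¬("word":String) = "{"),
                  if_neg (by decide : ¬("word":String) = "}"),
                  if_neg ?_]
                rintro ⟨-, hdp, hdb, hdcz, hlow, hprev⟩
                rw [htake] at hlow
                exact hcond ⟨hdp, hdb, hdcz, hlow, hprev⟩
              rw [hA, hskipA, hBskip]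
              exact hrec
          · -- plain separator character: no token, A's keyword test cannot fire
            have hnA : ¬(dp = 0 ∧ db = 0 ∧ dc = 0 ∧
                PySem.Chars.lower (List.take 2 (c :: r)) = ['i', 'n'] ∧
                (i = 0 ∨ pvAlnumU ((cs[i-1]?).getD ' ') = false) ∧ pvNextOk r = true) := by
              rintro ⟨-, -, -, hlow, -, -⟩
              rw [show List.take 2 (c :: r) = c :: List.take 1 r from rfl] at hlow
              simp only [PySem.Chars.lower, List.map_cons, List.cons.injEq] at hlow
              exact hw (lowerChar_i_alnum c hlow.1)
            have hA : loopA cs (c :: r) i dp db dc false =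
                loopA cs r (i + 1) dp db dc false := by
              rw [loopA]
              simp only [Bool.false_and, Bool.false_eq_true, if_false]
              rw [if_neg hq, if_neg h1, if_neg h2, if_neg h3, if_neg h4, if_neg h5, if_neg h6,
                if_neg hnA]
            have hB : tokenize (c :: r) i = tokenize r (i + 1) := by
              rw [tokenize, if_neg hq, if_neg ?_, if_neg hw]
              rintro (h | h | h | h | h | h) <;> simp_all
            rw [hA, hB]
            exact ih r hr (i + 1) dp db dc hdrop1.symm (by omega)

-- ===== VERDICT (by name: the statement is the Claim_ definition above) =====
theorem split_let_in_py_spec : Claim_equal_split_let_in_py := by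
  intro src _
  unfold Spec_split_let_in_py split_let_in_py split_let_in_py_alt
  by_cases h : PySem.Chars.startswith
      (PySem.Chars.lower (PySem.Chars.strip src.toList)) ['l', 'e', 't'] = true
  · simp only [h, Bool.not_true, Bool.false_eq_true, if_false]
    exact main_loop _ _ _ le_rfl 3 0 0 0 rfl (by omega)
  · simp only [Bool.not_eq_true] at h
    simp [h]
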